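-- pv_equiv track=rewrite | github.com/turbodumba/UZH-Informatik-1 | Midterm_Informatik1/Task 1.py | greetings
-- ===== SOURCE A (Python) =====
-- def greetings(names):
--     zero = True
--     ret_string = "Hello"
--     l = len(names)
--     ind = 0
--     for name in names:
--         zero = False
--         if l == 1:
--             ret_string += " " + name
--         elif ind == l - 1 and not l == 0:
--             ret_string += " and " + name
--         elif ind == l - 2:
--             ret_string += " " + name
--         else:
--             ret_string += " " + name + ","
--         ind += 1
--     if zero:
--         return ret_string + "?"
--     else:
--         return ret_string + "."
-- ===== SOURCE B (Python) =====
-- def greetings(names):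
--     lst = list(names)
--     if not lst:
--         return "Hello?"
--     if len(lst) == 1:
--         return "Hello " + lst[0] + "."
--     return "Hello " + ", ".join(lst[:-1]) + " and " + lst[-1] + "."
-- ===== Notes on version B (the rewrite author's own statement) =====
-- stated objective: simpler
-- what changed: Replaces A's per-index branch logic (comparisons against l-1/l-2 inside the loop with zero/ind state) by guarded cases on the collected list: empty -> 'Hello?', single -> 'Hello name.', otherwise ', '.join over all-but-last plus ' and ' before the last.
import Mathlib
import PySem

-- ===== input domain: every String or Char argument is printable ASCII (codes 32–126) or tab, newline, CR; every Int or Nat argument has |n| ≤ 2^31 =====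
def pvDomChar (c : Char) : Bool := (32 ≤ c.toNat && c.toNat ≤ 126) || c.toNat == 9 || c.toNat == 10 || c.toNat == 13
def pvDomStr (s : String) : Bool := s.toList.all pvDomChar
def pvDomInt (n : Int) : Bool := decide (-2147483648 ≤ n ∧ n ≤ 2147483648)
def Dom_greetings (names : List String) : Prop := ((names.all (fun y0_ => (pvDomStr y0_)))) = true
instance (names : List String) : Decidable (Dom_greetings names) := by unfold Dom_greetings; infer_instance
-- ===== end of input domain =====

-- B replaces A's per-index branch logic by one guarded join over the prefix plus the last element (objective: simpler).

-- ===== PORT A =====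
-- loop body of A's for-loop: state = (zero, ret_string, ind), l = len(names)
def greetingsStep (l : Int) (s : Bool × String × Int) (name : String) : Bool × String × Int :=
  if l = 1 then (false, s.2.1 ++ " " ++ name, s.2.2 + 1)
  else if s.2.2 = l - 1 ∧ ¬ l = 0 then (false, s.2.1 ++ " and " ++ name, s.2.2 + 1)
  else if s.2.2 = l - 2 then (false, s.2.1 ++ " " ++ name, s.2.2 + 1)
  else (false, s.2.1 ++ " " ++ name ++ ",", s.2.2 + 1)

def greetings (names : List String) : String :=
  let l : Int := PySem.List.len names
  let st := names.foldl (greetingsStep l) (true, "Hello", 0)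
  if st.1 then st.2.1 ++ "?" else st.2.1 ++ "."

-- ===== PORT B =====
def greetings_alt (names : List String) : String :=
  match names with
  | [] => "Hello?"
  | [n] => "Hello " ++ n ++ "."
  | a :: b :: rest =>
    "Hello " ++ PySem.Str.join ", " ((a :: b :: rest).dropLast) ++ " and "
      ++ (a :: b :: rest).getLast (by simp) ++ "."

-- ===== PRECONDITION & SPEC =====
def Spec_greetings (names : List String) (out : String) : Prop := out = greetings_alt names
instance (names : List String) (out : String) : Decidable (Spec_greetings names out) := by unfold Spec_greetings; infer_instance

-- ===== CLAIM (what is proved, stated in full; the proofs are below) =====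
def Claim_equal_greetings : Prop := ∀ (names : List String), Dom_greetings names → Spec_greetings names (greetings names)

-- ===== LEMMAS AND PROOFS =====

-- peeling one name off the front of a join over a nonempty tail
lemma join_cons (a b : String) (t : List String) :
    PySem.Str.join ", " (a :: b :: t) = a ++ ", " ++ PySem.Str.join ", " (b :: t) := by
  apply String.toList_inj.mp
  simp [PySem.Str.toList_join, PySem.Chars.join_cons_cons]

-- A's loop over a list of length ≥ 2, starting at a nonnegative index consistent with l:
-- it appends " a₁, a₂, …" for the front, " and " before the last, and ends at index l.
lemma greetings_fold_ge2 (l : Int) (t : List String) :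
    ∀ (a b r : String) (ind : Int) (z : Bool),
      0 ≤ ind → ind + ((t.length : Int) + 2) = l →
      (a :: b :: t).foldl (greetingsStep l) (z, r, ind) =
        (false,
         r ++ " " ++ PySem.Str.join ", " ((a :: b :: t).dropLast) ++ " and "
           ++ (a :: b :: t).getLast (by simp),
         l) := by
  induction t with
  | nil =>
    intro a b r ind z h0 hl
    have hl' : ind + 2 = l := by simpa using hl
    have h1 : greetingsStep l (z, r, ind) a = (false, r ++ " " ++ a, ind + 1) := by
      simp only [greetingsStep]
      rw [if_neg (by omega), if_neg (by rintro ⟨h, -⟩; omega), if_pos (by omega)]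
    have h2 : greetingsStep l (false, r ++ " " ++ a, ind + 1) b
        = (false, r ++ " " ++ a ++ " and " ++ b, ind + 1 + 1) := by
      simp only [greetingsStep]
      rw [if_neg (by omega), if_pos (by constructor <;> omega)]
    simp only [List.foldl]
    rw [h1, h2]
    refine Prod.ext rfl (Prod.ext ?_ (by show ind + 1 + 1 = l; omega))
    apply String.toList_inj.mp
    simp [PySem.Str.toList_join, PySem.Chars.join_singleton]
  | cons c t' ih =>
    intro a b r ind z h0 hl
    have hl' : ind + ((t'.length : Int) + 3) = l := by simp at hl; omega
    have hstep : greetingsStep l (z, r, ind) a = (false, r ++ " " ++ a ++ ",", ind + 1) := by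
      simp only [greetingsStep]
      rw [if_neg (by omega), if_neg (by rintro ⟨h, -⟩; omega), if_neg (by omega)]
    have hrec := ih b c (r ++ " " ++ a ++ ",") (ind + 1) false (by omega) (by omega)
    have hjoin : PySem.Str.join ", " ((a :: b :: c :: t').dropLast)
        = a ++ ", " ++ PySem.Str.join ", " ((b :: c :: t').dropLast) := by
      rw [show (a :: b :: c :: t').dropLast = a :: (b :: c :: t').dropLast from rfl,
          show (b :: c :: t').dropLast = b :: (c :: t').dropLast from rfl]
      exact join_cons a b ((c :: t').dropLast)
    simp only [List.foldl] at hrec ⊢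
    rw [hstep, hrec, hjoin]
    refine Prod.ext rfl (Prod.ext ?_ rfl)
    apply String.toList_inj.mp
    simp [List.getLast_cons]

-- ===== VERDICT (by name: the statement is the Claim_ definition above) =====
theorem greetings_spec : Claim_equal_greetings := by
  intro names _
  unfold Spec_greetings
  match names with
  | [] => decide
  | [n] =>
    apply String.toList_inj.mp
    simp [greetings, greetings_alt, greetingsStep]
  | a :: b :: t =>
    have h := greetings_fold_ge2 ((a :: b :: t).length : Int) t a b "Hello" 0 true
      (by omega) (by simp; omega)
    simp only [greetings, PySem.List.len_eq]
    rw [h]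
    simp only [greetings_alt]
    apply String.toList_inj.mp
    simp
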